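-- pv_equiv track=rewrite | github.com/Jason-happy-ops/Python- | practise/dynamic P.py | length1
-- ===== SOURCE A (Python) =====
-- def length1(list):       #贪心算法求最大连续子数列，这种方法只能计算连续的递增最大长度
--     global_length = 1       #记录全局最长子序列长度
--     for i in range(len(list)):
--         max_length = 1       #记录以list[i]为起点的最长子序列长度
--         last_num = list[i]      #记录当前最长子序列的最后一个数字
--
--         for j in range(i+1,len(list)):
--             if last_num < list[j]:
--                 max_length += 1
--                 last_num = list[j]
--             global_length = max(global_length, max_length)  #更新全局最长子序列长度
--
--     return global_length
-- ===== SOURCE B (Python) =====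
-- def length1(list):
--     # Backward pass with a monotonic stack of (value, chain-length) pairs:
--     # for each suffix start x, its greedy chain length is 1 + chain of the
--     # nearest later element greater than x (stack top after popping <= x).
--     best = 1
--     stack = []          # values strictly increase from top to bottom
--     for x in reversed(list):
--         while stack and stack[-1][0] <= x:
--             stack.pop()
--         g = 1 + stack[-1][1] if stack else 1
--         stack.append((x, g))
--         if g > best:
--             best = g
--     return best
-- ===== Notes on version B (the rewrite author's own statement) =====
-- stated objective: faster
-- what changed: Replaced the per-start quadratic rescan with one backward pass over the list maintaining a monotonic stack of (value, greedy-chain-length) pairs, so each start's chain length is 1 + the chain length at its next strictly greater element.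
import Mathlib
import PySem

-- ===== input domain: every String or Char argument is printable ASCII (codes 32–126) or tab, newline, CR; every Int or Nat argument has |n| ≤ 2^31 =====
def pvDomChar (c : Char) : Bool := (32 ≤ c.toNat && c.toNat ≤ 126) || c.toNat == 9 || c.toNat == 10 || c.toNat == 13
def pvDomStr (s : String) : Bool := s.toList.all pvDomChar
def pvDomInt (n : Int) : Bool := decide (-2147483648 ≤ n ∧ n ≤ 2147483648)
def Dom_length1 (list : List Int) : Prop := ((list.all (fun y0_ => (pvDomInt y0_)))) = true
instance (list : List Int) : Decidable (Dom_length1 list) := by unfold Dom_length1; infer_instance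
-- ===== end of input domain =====

-- B replaces A's quadratic per-start rescans by one backward pass with a
-- monotonic stack (value, greedy-chain-length); asymptotically faster.

-- ===== PORT A =====
-- body of A's inner loop over j (state: max_length, last_num, global_length)
def pvStepJ (s : Int × Int × Int) (xj : Int) : Int × Int × Int :=
  if s.2.1 < xj then (s.1 + 1, xj, max s.2.2 (s.1 + 1))
  else (s.1, s.2.1, max s.2.2 s.1)

-- body of A's outer loop over i; list[i]/list[j] are always in range, so pyGetD's default is never used
def pvStepI (list : List Int) (g : Int) (i : Int) : Int :=
  ((PySem.List.pyRange (i + 1) (PySem.List.len list) 1).foldl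
    (fun s j => pvStepJ s (PySem.List.pyGetD list j 0))
    (1, PySem.List.pyGetD list i 0, g)).2.2

def length1 (list : List Int) : Int :=
  (PySem.List.pyRange 0 (PySem.List.len list) 1).foldl (pvStepI list) 1

-- ===== PORT B =====
-- the 'while stack and stack[-1][0] <= x: stack.pop()' loop (stack top = head)
def pvPopLE (x : Int) : List (Int × Int) → List (Int × Int)
  | [] => []
  | (v, g) :: rest => if v ≤ x then pvPopLE x rest else (v, g) :: rest

-- body of B's loop over reversed(list) (state: best, stack)
def pvAltStep (s : Int × List (Int × Int)) (x : Int) : Int × List (Int × Int) :=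
  let st := pvPopLE x s.2
  let g : Int := match st with | [] => 1 | (_, gg) :: _ => 1 + gg
  (if g > s.1 then g else s.1, (x, g) :: st)

def length1_alt (list : List Int) : Int :=
  (list.reverse.foldl pvAltStep (1, [])).1

-- ===== PRECONDITION & SPEC =====
def Spec_length1 (list : List Int) (out : Int) : Prop := out = length1_alt list
instance (list : List Int) (out : Int) : Decidable (Spec_length1 list out) := by unfold Spec_length1; infer_instance

-- ===== CLAIM (what is proved, stated in full; the proofs are below) =====
def Claim_equal_length1 : Prop := ∀ (list : List Int), Dom_length1 list → Spec_length1 list (length1 list)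

-- ===== LEMMAS AND PROOFS =====

-- greedy chain length continuing after last value `last`
def pvChain (last : Int) : List Int → Int
  | [] => 0
  | x :: t => if last < x then 1 + pvChain x t else pvChain last t

-- lookup in the stack: chain value of the first entry strictly above `last`
def pvLk (last : Int) : List (Int × Int) → Int
  | [] => 0
  | (v, g) :: r => if last < v then g else pvLk last r

-- the stack B holds after having processed (the reverse of) l
def pvStk : List Int → List (Int × Int)
  | [] => []
  | x :: r => (x, 1 + pvChain x r) :: pvPopLE x (pvStk r)

-- reference value: max over all suffix starts of 1 + chain
def pvBval : List Int → Int
  | [] => 1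
  | x :: r => max (pvBval r) (1 + pvChain x r)

theorem pvChain_nonneg (l : List Int) : ∀ last, 0 ≤ pvChain last l := by
  induction l with
  | nil => intro last; simp [pvChain]
  | cons x t ih =>
      intro last
      simp only [pvChain]
      split
      · have := ih x; omega
      · exact ih last

theorem pv_inner (t : List Int) : ∀ ml last g,
    (t.foldl pvStepJ (ml, last, g)).1 = ml + pvChain last t ∧
    (t.foldl pvStepJ (ml, last, g)).2.2 =
      if t.isEmpty then g else max g (ml + pvChain last t) := by
  induction t with
  | nil => intro ml last g; simp [pvChain]
  | cons x r ih =>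
      intro ml last g
      simp only [List.foldl_cons, pvStepJ, pvChain, List.isEmpty_cons, Bool.false_eq_true,
        if_false]
      by_cases h : last < x
      · rw [if_pos h, if_pos h]
        obtain ⟨h1, h2⟩ := ih (ml + 1) x (max g (ml + 1))
        rw [h1, h2]
        refine ⟨by ring, ?_⟩
        rcases r with _ | ⟨y, rr⟩
        · simp [pvChain]
        · have := pvChain_nonneg (y :: rr) x
          simp only [List.isEmpty_cons, Bool.false_eq_true, if_false]
          omega
      · rw [if_neg h, if_neg h]
        obtain ⟨h1, h2⟩ := ih ml last (max g ml)
        rw [h1, h2]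
        refine ⟨rfl, ?_⟩
        rcases r with _ | ⟨y, rr⟩
        · simp [pvChain]
        · have := pvChain_nonneg (y :: rr) last
          simp only [List.isEmpty_cons, Bool.false_eq_true, if_false]
          omega

theorem pv_stepI (list : List Int) (k : Nat) (hk : k < list.length) (g : Int) (hg : 1 ≤ g) :
    pvStepI list g k = max g (1 + pvChain list[k] (list.drop (k + 1))) := by
  unfold pvStepI
  rw [show ((k : Int) + 1) = ((k + 1 : Nat) : Int) by push_cast; ring]
  rw [PySem.List.foldl_pyRange_pyGetD list 0 pvStepJ
    (1, PySem.List.pyGetD list (k : Int) 0, g) (by exact_mod_cast Nat.zero_le (k + 1))]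
  rw [PySem.List.pyGetD_natCast, List.getD_eq_getElem list 0 hk, Int.toNat_natCast]
  obtain ⟨-, h2⟩ := pv_inner (list.drop (k + 1)) 1 list[k] g
  rw [h2]
  rcases hdrop : list.drop (k + 1) with _ | ⟨y, rr⟩
  · simp [pvChain]; omega
  · simp

def pvFoldA (g : Int) : List Int → Int
  | [] => g
  | x :: t => pvFoldA (max g (1 + pvChain x t)) t

theorem pvFoldA_max (t : List Int) : ∀ a c, pvFoldA (max a c) t = max (pvFoldA a t) c := by
  induction t with
  | nil => intro a c; rfl
  | cons x r ih =>
      intro a c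
      simp only [pvFoldA]
      rw [show max (max a c) (1 + pvChain x r) = max (max a (1 + pvChain x r)) c by omega, ih]

theorem pvFoldA_bval (l : List Int) : pvFoldA 1 l = pvBval l := by
  induction l with
  | nil => rfl
  | cons x r ih =>
      simp only [pvFoldA, pvBval]
      rw [pvFoldA_max, ih]

theorem pv_outer (list : List Int) : ∀ n k : Nat, list.length - k ≤ n → ∀ g : Int, 1 ≤ g →
    (PySem.List.pyRange (k : Int) (PySem.List.len list) 1).foldl (pvStepI list) g
      = pvFoldA g (list.drop k) := by
  intro n
  induction n with
  | zero =>
      intro k hk g hg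
      have hle : list.length ≤ k := by omega
      rw [PySem.List.pyRange_one_eq_nil (by simp [PySem.List.len_eq]; exact_mod_cast hle),
        List.drop_eq_nil_of_le hle]
      rfl
  | succ n ih =>
      intro k hk g hg
      by_cases h : k < list.length
      · rw [PySem.List.pyRange_one_cons (by simp [PySem.List.len_eq]; exact_mod_cast h)]
        simp only [List.foldl_cons]
        rw [pv_stepI list k h g hg]
        rw [show ((k : Int) + 1) = ((k + 1 : Nat) : Int) by push_cast; ring]
        rw [ih (k + 1) (by omega) _ (by have := pvChain_nonneg (list.drop (k + 1)) list[k]; omega)]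
        rw [List.drop_eq_getElem_cons h]
        rfl
      · have hle : list.length ≤ k := by omega
        rw [PySem.List.pyRange_one_eq_nil (by simp [PySem.List.len_eq]; exact_mod_cast hle),
          List.drop_eq_nil_of_le hle]
        rfl

theorem pv_A (list : List Int) : length1 list = pvBval list := by
  unfold length1
  rw [show (0 : Int) = ((0 : Nat) : Int) by rfl,
    pv_outer list list.length 0 (by omega) 1 le_rfl]
  simpa using pvFoldA_bval list

theorem pv_pop_lk (x last : Int) (h : x ≤ last) : ∀ S, pvLk last (pvPopLE x S) = pvLk last S := by
  intro S
  induction S with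
  | nil => rfl
  | cons p r ih =>
      obtain ⟨v, g⟩ := p
      simp only [pvPopLE]
      by_cases hv : v ≤ x
      · rw [if_pos hv, ih]
        simp only [pvLk]
        rw [if_neg (show ¬ last < v by omega)]
      · rw [if_neg hv]

theorem pv_lk_pop_head (x : Int) : ∀ S, pvLk x S = (match pvPopLE x S with | [] => 0 | (_, g) :: _ => g) := by
  intro S
  induction S with
  | nil => rfl
  | cons p r ih =>
      obtain ⟨v, g⟩ := p
      simp only [pvPopLE, pvLk]
      by_cases hv : v ≤ x
      · rw [if_pos hv, if_neg (by omega), ih]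
      · rw [if_neg hv, if_pos (by omega)]

theorem pv_lk_stk (l : List Int) : ∀ last, pvLk last (pvStk l) = pvChain last l := by
  induction l with
  | nil => intro last; rfl
  | cons x r ih =>
      intro last
      simp only [pvStk, pvLk, pvChain]
      by_cases h : last < x
      · rw [if_pos h, if_pos h]
      · rw [if_neg h, if_neg h, pv_pop_lk x last (by omega), ih]

theorem pv_fold_alt (l : List Int) : l.reverse.foldl pvAltStep (1, []) = (pvBval l, pvStk l) := by
  induction l with
  | nil => rfl
  | cons x r ih =>
      simp only [List.reverse_cons, List.foldl_append, ih, List.foldl_cons, List.foldl_nil]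
      simp only [pvAltStep]
      have hg : (match pvPopLE x (pvStk r) with | [] => (1 : Int) | (_, gg) :: _ => 1 + gg)
          = 1 + pvChain x r := by
        rw [← pv_lk_stk r x, pv_lk_pop_head x (pvStk r)]
        rcases pvPopLE x (pvStk r) with _ | ⟨⟨v, g⟩, rest⟩ <;> simp
      simp only [hg, pvStk, pvBval]
      congr 1
      omega

-- ===== VERDICT (by name: the statement is the Claim_ definition above) =====
theorem length1_spec : Claim_equal_length1 := by
  intro list _
  unfold Spec_length1 length1_alt
  rw [pv_fold_alt, pv_A]
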